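-- pv_equiv track=rewrite | github.com/marvinxu-free/TorchEasyRec | tzrec/models/three_tower_dcn.py | _build_ranges_from_dims
-- ===== SOURCE A (Python) =====
-- from typing import Any, Dict, List, Optional, Tuple
--
-- def _build_ranges_from_dims(dims: List[int], take_half: str) -> List[Tuple[int, int]]:
--     """Build per-feature split ranges from a list of feature dimensions.
--
--     Each feature's embedding is doubled; this computes the dimension ranges
--     to keep after splitting each feature's embedding in half.
--
--     Args:
--         dims: list of (doubled) embedding dimensions per feature.
--         take_half: ``"first"`` for the first half, ``"second"`` for the
--             second half of each feature's embedding.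
--
--     Returns:
--         List of (start, end) tuples for slicing.
--     """
--     ranges = []
--     offset = 0
--     for dim in dims:
--         half = dim // 2
--         if take_half == "first":
--             ranges.append((offset, offset + half))
--         else:
--             ranges.append((offset + half, offset + dim))
--         offset += dim
--     return ranges
-- ===== SOURCE B (Python) =====
-- from typing import List, Tuple
--
-- def _build_ranges_from_dims(dims: List[int], take_half: str) -> List[Tuple[int, int]]:
--     # Divide and conquer, no running offset: ranges for each half of the
--     # list are computed independently at origin 0; the right half's ranges
--     # are then shifted by the total width of the left half. Correct because
--     # a feature's absolute start is the sum of all dims before it, which is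
--     # exactly the accumulated shifts applied on the path to its leaf.
--     if not dims:
--         return []
--     if len(dims) == 1:
--         d = dims[0]
--         h = d // 2
--         return [(0, h)] if take_half == "first" else [(h, d)]
--     mid = len(dims) // 2
--     left_dims = dims[:mid]
--     left = _build_ranges_from_dims(left_dims, take_half)
--     right = _build_ranges_from_dims(dims[mid:], take_half)
--     off = sum(left_dims)
--     return left + [(s + off, e + off) for (s, e) in right]
-- ===== Notes on version B (the rewrite author's own statement) =====
-- stated objective: alternative
-- what changed: Replaces A's single left-to-right loop with a running offset accumulator by an offset-free divide-and-conquer: split the dims list in half, build each half's ranges independently at origin 0, and shift the right half's ranges by the left half's total width.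
import Mathlib
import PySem

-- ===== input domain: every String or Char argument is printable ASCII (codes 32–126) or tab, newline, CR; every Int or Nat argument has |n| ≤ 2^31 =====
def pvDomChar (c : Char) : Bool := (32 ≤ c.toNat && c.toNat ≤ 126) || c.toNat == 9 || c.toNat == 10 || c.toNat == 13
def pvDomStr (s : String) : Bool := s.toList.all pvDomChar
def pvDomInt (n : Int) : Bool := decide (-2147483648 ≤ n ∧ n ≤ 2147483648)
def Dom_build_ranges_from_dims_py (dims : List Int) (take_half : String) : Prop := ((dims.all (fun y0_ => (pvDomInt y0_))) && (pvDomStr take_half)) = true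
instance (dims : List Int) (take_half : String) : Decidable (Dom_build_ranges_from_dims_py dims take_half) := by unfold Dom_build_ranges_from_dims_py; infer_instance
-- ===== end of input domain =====

-- B replaces A's running-offset loop with an offset-free divide-and-conquer:
-- each half's ranges are built at origin 0 and the right half is shifted by
-- the left half's total width (alternative algorithm, same return values).


-- ===== PORT A =====
-- Literal port of A: one foldl over dims carrying (ranges, offset);
-- dim // 2 is Python floor division → PySem.Int.floordiv.
def build_ranges_from_dims_py (dims : List Int) (take_half : String) : List (Int × Int) :=
  (dims.foldl
    (fun (st : List (Int × Int) × Int) dim =>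
      let half := PySem.Int.floordiv dim 2
      let ranges :=
        if take_half == "first" then st.1 ++ [(st.2, st.2 + half)]
        else st.1 ++ [(st.2 + half, st.2 + dim)]
      (ranges, st.2 + dim))
    ([], 0)).1

-- ===== PORT B =====
-- Literal port of B: divide and conquer. dims[:mid] / dims[mid:] with
-- 0 ≤ mid ≤ len are exactly List.take / List.drop; sum → List.sum.
-- The fuel argument (= dims.length, always sufficient) only makes the
-- recursion structural; it changes no computed value.
def pvAltGo (fuel : Nat) (dims : List Int) (take_half : String) : List (Int × Int) :=
  match fuel, dims with
  | _, [] => []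
  | _, [d] =>
    let h := PySem.Int.floordiv d 2
    if take_half == "first" then [((0 : Int), h)] else [(h, d)]
  | 0, _ => []  -- unreachable: fuel = dims.length ≥ 2 here
  | fuel + 1, d0 :: d1 :: rest =>
    let mid := (d0 :: d1 :: rest).length / 2
    let left_dims := (d0 :: d1 :: rest).take mid
    let left := pvAltGo fuel left_dims take_half
    let right := pvAltGo fuel ((d0 :: d1 :: rest).drop mid) take_half
    let off := left_dims.sum
    left ++ right.map (fun p => (p.1 + off, p.2 + off))

def build_ranges_from_dims_py_alt (dims : List Int) (take_half : String) : List (Int × Int) :=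
  pvAltGo dims.length dims take_half

-- ===== PRECONDITION & SPEC =====
def Spec_build_ranges_from_dims_py (dims : List Int) (take_half : String) (out : List (Int × Int)) : Prop := out = build_ranges_from_dims_py_alt dims take_half
instance (dims : List Int) (take_half : String) (out : List (Int × Int)) : Decidable (Spec_build_ranges_from_dims_py dims take_half out) := by unfold Spec_build_ranges_from_dims_py; infer_instance

-- ===== CLAIM (what is proved, stated in full; the proofs are below) =====
def Claim_equal_build_ranges_from_dims_py : Prop := ∀ (dims : List Int) (take_half : String), Dom_build_ranges_from_dims_py dims take_half → Spec_build_ranges_from_dims_py dims take_half (build_ranges_from_dims_py dims take_half)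

-- ===== LEMMAS AND PROOFS =====

-- Reference recursion with an explicit offset; both ports are reduced to it.
def pvSpecR (first : Bool) : Int → List Int → List (Int × Int)
  | _, [] => []
  | off, d :: ds =>
    (if first then (off, off + PySem.Int.floordiv d 2)
     else (off + PySem.Int.floordiv d 2, off + d)) :: pvSpecR first (off + d) ds

theorem pvA_foldl (c : Bool) (dims : List Int) (rs : List (Int × Int)) (off : Int) :
    (dims.foldl
      (fun (st : List (Int × Int) × Int) dim =>
        let half := PySem.Int.floordiv dim 2
        let ranges :=
          if c then st.1 ++ [(st.2, st.2 + half)]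
          else st.1 ++ [(st.2 + half, st.2 + dim)]
        (ranges, st.2 + dim))
      (rs, off)).1 = rs ++ pvSpecR c off dims := by
  induction dims generalizing rs off with
  | nil => simp [pvSpecR]
  | cons d ds ih =>
    cases c
    · simpa [pvSpecR] using ih (rs ++ [(off + PySem.Int.floordiv d 2, off + d)]) (off + d)
    · simpa [pvSpecR] using ih (rs ++ [(off, off + PySem.Int.floordiv d 2)]) (off + d)

-- Shifting the reference recursion moves its base offset.
theorem pvSpecR_shift (c : Bool) (dims : List Int) (b t : Int) :
    (pvSpecR c b dims).map (fun p => (p.1 + t, p.2 + t)) = pvSpecR c (b + t) dims := by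
  induction dims generalizing b with
  | nil => simp [pvSpecR]
  | cons d ds ih =>
    cases c <;>
      simp only [pvSpecR, List.map_cons, ih] <;> simp [add_right_comm]

-- The reference recursion splits over append, offsetting by the left sum.
theorem pvSpecR_append (c : Bool) (xs ys : List Int) (b : Int) :
    pvSpecR c b (xs ++ ys) = pvSpecR c b xs ++ pvSpecR c (b + xs.sum) ys := by
  induction xs generalizing b with
  | nil => simp [pvSpecR]
  | cons x xs ih =>
    cases c <;> simp [pvSpecR, ih, add_assoc]

theorem pvAltGo_eq (fuel : Nat) (dims : List Int) (take_half : String)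
    (hf : dims.length ≤ fuel) :
    pvAltGo fuel dims take_half = pvSpecR (take_half == "first") 0 dims := by
  induction fuel generalizing dims with
  | zero =>
    match dims with
    | [] => simp [pvAltGo, pvSpecR]
    | _ :: _ => simp at hf
  | succ fuel ih =>
    match dims with
    | [] => simp [pvAltGo, pvSpecR]
    | [d] => cases h : take_half == "first" <;> simp [pvAltGo, pvSpecR, h]
    | d0 :: d1 :: rest =>
      simp only [List.length_cons] at hf
      simp only [pvAltGo]
      rw [ih _ (by simp only [List.length_take, List.length_cons]; omega),
          ih _ (by simp only [List.length_drop, List.length_cons]; omega),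
          pvSpecR_shift, zero_add]
      conv_rhs => rw [← List.take_append_drop ((d0 :: d1 :: rest).length / 2) (d0 :: d1 :: rest)]
      rw [pvSpecR_append, zero_add]

theorem pvB_eq (dims : List Int) (take_half : String) :
    build_ranges_from_dims_py_alt dims take_half = pvSpecR (take_half == "first") 0 dims :=
  pvAltGo_eq dims.length dims take_half le_rfl

-- ===== VERDICT (by name: the statement is the Claim_ definition above) =====
theorem build_ranges_from_dims_py_spec : Claim_equal_build_ranges_from_dims_py := by
  intro dims take_half _
  show build_ranges_from_dims_py dims take_half = build_ranges_from_dims_py_alt dims take_half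
  rw [pvB_eq]
  unfold build_ranges_from_dims_py
  simpa using pvA_foldl (take_half == "first") dims [] 0
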